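-- pv_equiv track=rewrite | github.com/sselin-co/Cancer-AR | src/ml/preprocessing/metadata.py | dict_intersection
-- ===== SOURCE A (Python) =====
-- def dict_intersection(dict_list):
--     parsed_dicts = []
--     common_dict = {}
--     for d in dict_list:
--         nd = {}
--         for key, val in d.items():
--             if key in common_dict.keys():
--                 continue
--             common = True
--             for e in dict_list:
--                 if e.get(key) != val:
--                     common = False
--             if not common:
--                 nd[key] = val
--             else:
--                 common_dict[key] = val
--         parsed_dicts.append(nd)
--     return common_dict, parsed_dicts
-- ===== SOURCE B (Python) =====
-- def dict_intersection(dict_list):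
--     n = len(dict_list)
--     # one counting pass: how many dicts contain exactly this (key, value) pair
--     pair_count = {}
--     for d in dict_list:
--         for kv in d.items():
--             pair_count[kv] = pair_count.get(kv, 0) + 1
--     # a pair is common iff it occurs in all n dicts; keep first-occurrence order
--     common_dict = {}
--     for d in dict_list:
--         for key, val in d.items():
--             if key not in common_dict and pair_count[(key, val)] == n:
--                 common_dict[key] = val
--     parsed_dicts = [{k: v for k, v in d.items() if k not in common_dict}
--                     for d in dict_list]
--     return common_dict, parsed_dicts
-- ===== Notes on version B (the rewrite author's own statement) =====
-- stated objective: faster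
-- what changed: A re-scans the whole dict list for every key of every dict (O(D^2*K)); B makes one counting pass over all (key,value) pairs and then decides commonness by comparing the pair's count with the number of dicts, building the common dict and the residual dicts in simple linear passes.
import Mathlib
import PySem

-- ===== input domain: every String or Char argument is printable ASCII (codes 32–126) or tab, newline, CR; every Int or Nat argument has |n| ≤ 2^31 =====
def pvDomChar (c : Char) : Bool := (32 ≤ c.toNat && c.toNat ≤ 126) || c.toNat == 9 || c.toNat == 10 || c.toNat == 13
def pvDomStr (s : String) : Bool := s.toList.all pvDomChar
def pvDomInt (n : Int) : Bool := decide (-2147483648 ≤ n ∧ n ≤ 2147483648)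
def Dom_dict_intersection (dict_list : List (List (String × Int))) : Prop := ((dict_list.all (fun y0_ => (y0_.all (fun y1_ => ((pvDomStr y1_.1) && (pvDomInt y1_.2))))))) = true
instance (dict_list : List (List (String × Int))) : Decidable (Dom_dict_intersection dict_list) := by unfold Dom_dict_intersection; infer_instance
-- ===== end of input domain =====

-- B replaces A's per-key rescans of the whole dict list by one counting pass over (key, value)
-- pairs; commonness is then 'this pair occurs in every dict' (objective: faster, asymptotic).

-- ===== PORT A =====
-- dict lookup on the association-list encoding: first match (Python d.get(k))
def pvLookup (d : List (String × Int)) (k : String) : Option Int :=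
  match d with
  | [] => none
  | p :: rest => if p.1 == k then some p.2 else pvLookup rest k

-- Python d[k] = v: overwrite in place, new keys append
def pvInsert (d : List (String × Int)) (k : String) (v : Int) : List (String × Int) :=
  if (pvLookup d k).isSome then d.map (fun p => if p.1 == k then (k, v) else p)
  else d ++ [(k, v)]

-- body of A's inner 'for key, val in d.items()' loop; state = (common_dict, nd)
def pvAInner (dict_list : List (List (String × Int)))
    (st : List (String × Int) × List (String × Int)) (kv : String × Int) :
    List (String × Int) × List (String × Int) :=
  if (pvLookup st.1 kv.1).isSome then st          -- if key in common_dict: continue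
  else
    let common := dict_list.foldl
      (fun c e => if pvLookup e kv.1 ≠ some kv.2 then false else c) true
    if !common then (st.1, pvInsert st.2 kv.1 kv.2)   -- nd[key] = val
    else (pvInsert st.1 kv.1 kv.2, st.2)              -- common_dict[key] = val

-- body of A's outer 'for d in dict_list' loop; state = (common_dict, parsed_dicts)
def pvAOuter (dict_list : List (List (String × Int)))
    (st : List (String × Int) × List (List (String × Int))) (d : List (String × Int)) :
    List (String × Int) × List (List (String × Int)) :=
  let inner := d.foldl (pvAInner dict_list) (st.1, [])
  (inner.1, st.2 ++ [inner.2])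

def dict_intersection (dict_list : List (List (String × Int))) :
    (List (String × Int)) × (List (List (String × Int))) :=
  let st := dict_list.foldl (pvAOuter dict_list) ([], [])
  (st.1, st.2)

-- ===== PORT B =====
-- counting pass: pair_count[kv] = pair_count.get(kv, 0) + 1
def pvBCount (dict_list : List (List (String × Int))) : PySem.Dict (String × Int) Int :=
  dict_list.foldl
    (fun pc d => d.foldl (fun pc kv => pc.insert kv (pc.getD kv 0 + 1)) pc)
    PySem.Dict.empty

-- second pass building common_dict (keys are fresh when appended, by the guard);
-- pair_count[(key, val)] is ported with getD: the pair was counted, so the key is present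
def pvBCommon (dict_list : List (List (String × Int))) : List (String × Int) :=
  let n : Int := dict_list.length
  let pair_count := pvBCount dict_list
  dict_list.foldl
    (fun cd d => d.foldl
      (fun cd kv =>
        if (pvLookup cd kv.1).isNone && (pair_count.getD kv 0 == n) then cd ++ [kv] else cd)
      cd)
    []

def dict_intersection_alt (dict_list : List (List (String × Int))) :
    (List (String × Int)) × (List (List (String × Int))) :=
  let common_dict := pvBCommon dict_list
  let parsed_dicts := dict_list.map
    (fun d => d.filter (fun kv => (pvLookup common_dict kv.1).isNone))
  (common_dict, parsed_dicts)

-- ===== PRECONDITION & SPEC =====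
-- Pre_ excludes inner lists with duplicate keys: a Python dict cannot hold them, so such
-- association lists are an ambiguous encoding of A's input (Python collapses them on entry).
def Pre_dict_intersection (dict_list : List (List (String × Int))) : Prop :=
  ∀ d ∈ dict_list, (d.map Prod.fst).Nodup

instance (dict_list : List (List (String × Int))) : Decidable (Pre_dict_intersection dict_list) := by
  unfold Pre_dict_intersection; infer_instance

def pvWitness_dict_intersection : (List (List (String × Int))) :=
  [[("a", 1), ("b", 2)], [("a", 1), ("c", 3)]]

def Spec_dict_intersection (dict_list : List (List (String × Int))) (out : (List (String × Int)) × (List (List (String × Int)))) : Prop := out = dict_intersection_alt dict_list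
instance (dict_list : List (List (String × Int))) (out : (List (String × Int)) × (List (List (String × Int)))) : Decidable (Spec_dict_intersection dict_list out) := by unfold Spec_dict_intersection; infer_instance

-- ===== CLAIM (what is proved, stated in full; the proofs are below) =====
def Claim_equal_dict_intersection : Prop := ∀ (dict_list : List (List (String × Int))), Dom_dict_intersection dict_list → Pre_dict_intersection dict_list → Spec_dict_intersection dict_list (dict_intersection dict_list)

-- ===== LEMMAS AND PROOFS =====

-- 'the pair (k, v) is common': every dict of the list maps k to v
def pvPAll (L : List (List (String × Int))) (k : String) (v : Int) : Bool :=
  L.all (fun e => pvLookup e k == some v)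

-- the common_dict evolution at the level of a single (key, value) pair
def pvStepCd (L : List (List (String × Int))) (cd : List (String × Int)) (p : String × Int) :
    List (String × Int) :=
  if (pvLookup cd p.1).isSome then cd
  else if pvPAll L p.1 p.2 then pvInsert cd p.1 p.2 else cd

def pvC (L : List (List (String × Int))) : List (String × Int) :=
  L.foldl (fun cd d => d.foldl (pvStepCd L) cd) []

-- A's inner flag loop computes pvPAll
theorem pvFlag_eq (L : List (List (String × Int))) (k : String) (v : Int) (c : Bool) :
    L.foldl (fun c e => if pvLookup e k ≠ some v then false else c) c = (c && pvPAll L k v) := by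
  induction L generalizing c with
  | nil => simp [pvPAll]
  | cons e L ih =>
      simp only [List.foldl_cons, pvPAll, List.all_cons]
      rw [ih]
      by_cases h : pvLookup e k = some v
      · simp [h, pvPAll]
      · simp [h, pvPAll]

theorem pvLookup_eq_some_of_mem (d : List (String × Int)) (p : String × Int) :
    (d.map Prod.fst).Nodup → p ∈ d → pvLookup d p.1 = some p.2 := by
  induction d with
  | nil => intro _ h; cases h
  | cons q rest ih =>
      intro hd h
      simp only [List.map_cons, List.nodup_cons] at hd
      rcases List.mem_cons.mp h with h | h
      · subst h; simp [pvLookup]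
      · have hne : q.1 ≠ p.1 := by
          intro he
          exact hd.1 (he ▸ (List.mem_map.mpr ⟨p, h, rfl⟩))
        simp only [pvLookup]
        rw [if_neg (by simpa using hne)]
        exact ih hd.2 h

theorem pvMem_of_lookup (d : List (String × Int)) (k : String) (v : Int) :
    pvLookup d k = some v → (k, v) ∈ d := by
  induction d with
  | nil => intro h; simp [pvLookup] at h
  | cons q rest ih =>
      intro h
      simp only [pvLookup] at h
      by_cases hq : q.1 == k
      · rw [if_pos hq] at h
        have h1 : q.1 = k := by simpa using hq
        have h2 : q.2 = v := by injection h
        have : (k, v) = q := by cases q; simp_all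
        rw [← this]
        exact List.mem_cons_self ..
      · rw [if_neg hq] at h
        exact List.mem_cons_of_mem _ (ih h)

theorem pvLookup_append (d d' : List (String × Int)) (k : String) :
    pvLookup (d ++ d') k = ((pvLookup d k).or (pvLookup d' k)) := by
  induction d with
  | nil => simp [pvLookup]
  | cons q rest ih =>
      simp only [pvLookup, List.cons_append]
      by_cases hq : q.1 == k
      · simp [hq]
      · simp [hq, ih]

theorem pvInsert_of_none (d : List (String × Int)) (k : String) (v : Int)
    (h : pvLookup d k = none) : pvInsert d k v = d ++ [(k, v)] := by
  simp [pvInsert, h]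

-- counting: in a dict with unique keys, a pair occurs once iff the lookup hits it
theorem pvCount_pair (d : List (String × Int)) (p : String × Int) :
    (d.map Prod.fst).Nodup →
    d.count p = if pvLookup d p.1 = some p.2 then 1 else 0 := by
  induction d with
  | nil => intro _; simp [pvLookup]
  | cons q rest ih =>
      intro hd
      simp only [List.map_cons, List.nodup_cons] at hd
      have ih' := ih hd.2
      by_cases hq : q.1 == p.1
      · have h1 : q.1 = p.1 := by simpa using hq
        have hrest : pvLookup rest p.1 = none := by
          cases hrl : pvLookup rest p.1 with
          | none => rfl
          | some w =>
              exact absurd (List.mem_map.mpr ⟨(p.1, w), pvMem_of_lookup _ _ _ hrl, rfl⟩)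
                (h1 ▸ hd.1)
        have hcrest : rest.count p = 0 := by rw [ih', hrest]; simp
        have hlkup : pvLookup (q :: rest) p.1 = some q.2 := by simp [pvLookup, hq]
        simp only [hlkup, List.count_cons, hcrest]
        by_cases hv : q.2 = p.2
        · have hqp' : q = p := Prod.ext_iff.mpr ⟨h1, hv⟩
          have hqp : (p == q) = true := by simp [hqp']
          simp [hqp']
        · have hne : ¬ (p = q) := fun e => hv (congrArg Prod.snd e.symm)
          have hqp : ¬ ((p == q) = true) := by simpa using hne
          have hs : ¬ (some q.2 = some p.2) := by simpa using hv
          have hne' : ¬ (q = p) := fun e => hne e.symm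
          simp [hs, hne']
      · have hne : ¬ (p = q) := fun e => (by simpa using hq : ¬ (q.1 = p.1)) (congrArg Prod.fst e.symm)
        have hqp : ¬ ((p == q) = true) := by simpa using hne
        have hlkup : pvLookup (q :: rest) p.1 = pvLookup rest p.1 := by simp [pvLookup, hq]
        have hne' : ¬ (q = p) := fun e => hne e.symm
        simp only [hlkup, List.count_cons, ih']
        simp [hne']

theorem pvSum_ones (xs : List Nat) :
    (∀ x ∈ xs, x ≤ 1) → (xs.sum = xs.length ↔ ∀ x ∈ xs, x = 1) := by
  induction xs with
  | nil => simp
  | cons x xs ih =>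
      intro h
      have hx : x ≤ 1 := h x (List.mem_cons_self ..)
      have ih' := ih (fun y hy => h y (List.mem_cons_of_mem _ hy))
      have hsum : xs.sum ≤ xs.length := by
        have := List.sum_le_card_nsmul xs 1 (fun y hy => h y (List.mem_cons_of_mem _ hy))
        simpa using this
      simp only [List.sum_cons, List.length_cons]
      constructor
      · intro he
        have hx1 : x = 1 := by omega
        have hxs : xs.sum = xs.length := by omega
        intro y hy
        rcases List.mem_cons.mp hy with hy | hy
        · omega
        · exact (ih'.mp hxs) y hy
      · intro hall
        have h1 := ih'.mpr (fun y hy => hall y (List.mem_cons_of_mem _ hy))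
        have h2 := hall x (List.mem_cons_self ..)
        omega

theorem pvBCount_getD (L : List (List (String × Int))) (p : String × Int) :
    (pvBCount L).getD p 0 = (L.flatten.count p : Int) := by
  unfold pvBCount
  rw [← List.foldl_flatten, PySem.Dict.getD_foldl_insert_add_one]
  simp

-- the counted condition is exactly commonness (under unique keys per dict)
theorem pvCond_iff (L : List (List (String × Int))) (hL : Pre_dict_intersection L)
    (p : String × Int) :
    ((pvBCount L).getD p 0 == (L.length : Int)) = pvPAll L p.1 p.2 := by
  have key : (L.flatten.count p = L.length) ↔ (pvPAll L p.1 p.2 = true) := by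
    rw [List.count_flatten]
    have hlen : (L.map (List.count p)).length = L.length := List.length_map ..
    have hones : ∀ x ∈ L.map (List.count p), x ≤ 1 := by
      intro x hx
      rcases List.mem_map.mp hx with ⟨d, hd, rfl⟩
      rw [pvCount_pair d p (hL d hd)]
      split <;> omega
    rw [← hlen, pvSum_ones _ hones]
    constructor
    · intro h
      unfold pvPAll
      rw [List.all_eq_true]
      intro e he
      have := h (e.count p) (List.mem_map.mpr ⟨e, he, rfl⟩)
      rw [pvCount_pair e p (hL e he)] at this
      by_cases hc : pvLookup e p.1 = some p.2
      · simpa using hc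
      · rw [if_neg hc] at this; omega
    · intro h x hx
      rcases List.mem_map.mp hx with ⟨d, hd, rfl⟩
      unfold pvPAll at h
      rw [List.all_eq_true] at h
      have := h d hd
      rw [pvCount_pair d p (hL d hd)]
      simp only [beq_iff_eq] at this
      rw [if_pos this]
  rw [pvBCount_getD]
  by_cases hp : pvPAll L p.1 p.2 = true
  · rw [hp]
    have : L.flatten.count p = L.length := key.mpr hp
    simp [this]
  · rw [Bool.eq_false_iff.mpr hp]
    have hne : L.flatten.count p ≠ L.length := fun e => hp (key.mp e)
    simp only [beq_eq_false_iff_ne, ne_eq, Int.natCast_inj]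
    exact hne

-- invariant: everything in the evolving common_dict is common
def pvInv (L : List (List (String × Int))) (cd : List (String × Int)) : Prop :=
  ∀ p ∈ cd, pvPAll L p.1 p.2 = true

theorem pvInv_step (L : List (List (String × Int))) (cd : List (String × Int))
    (p : String × Int) (h : pvInv L cd) : pvInv L (pvStepCd L cd p) := by
  unfold pvStepCd
  split
  · exact h
  · split
    · next hsome hP =>
        have hnone : pvLookup cd p.1 = none := by
          cases hlk : pvLookup cd p.1 with
          | none => rfl
          | some w => rw [hlk] at hsome; simp at hsome
        rw [pvInsert_of_none cd p.1 p.2 hnone]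
        intro q hq
        rcases List.mem_append.mp hq with hq | hq
        · exact h q hq
        · have : q = (p.1, p.2) := by simpa using hq
          subst this
          exact hP
    · exact h

theorem pvInv_foldl (L : List (List (String × Int))) (d : List (String × Int))
    (cd : List (String × Int)) (h : pvInv L cd) : pvInv L (d.foldl (pvStepCd L) cd) := by
  induction d generalizing cd with
  | nil => exact h
  | cons p rest ih => exact ih _ (pvInv_step L cd p h)

theorem pvInv_foldl2 (L M : List (List (String × Int))) (cd : List (String × Int))
    (h : pvInv L cd) :
    pvInv L (M.foldl (fun cd d => d.foldl (pvStepCd L) cd) cd) := by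
  induction M generalizing cd with
  | nil => exact h
  | cons d rest ih => exact ih _ (pvInv_foldl L d cd h)

theorem pvStep_mono (L : List (List (String × Int))) (cd : List (String × Int))
    (p : String × Int) (k : String) (h : (pvLookup cd k).isSome = true) :
    (pvLookup (pvStepCd L cd p) k).isSome = true := by
  unfold pvStepCd
  split
  · exact h
  · split
    · next hsome hP =>
        have hnone : pvLookup cd p.1 = none := by
          cases hlk : pvLookup cd p.1 with
          | none => rfl
          | some w => rw [hlk] at hsome; simp at hsome
        rw [pvInsert_of_none cd p.1 p.2 hnone, pvLookup_append]
        cases hlk : pvLookup cd k with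
        | none => rw [hlk] at h; simp at h
        | some w => simp
    · exact h

theorem pvFoldl_mono (L : List (List (String × Int))) (d : List (String × Int))
    (cd : List (String × Int)) (k : String) (h : (pvLookup cd k).isSome = true) :
    (pvLookup (d.foldl (pvStepCd L) cd) k).isSome = true := by
  induction d generalizing cd with
  | nil => exact h
  | cons p rest ih => exact ih _ (pvStep_mono L cd p k h)

theorem pvFoldl2_mono (L M : List (List (String × Int))) (cd : List (String × Int))
    (k : String) (h : (pvLookup cd k).isSome = true) :
    (pvLookup (M.foldl (fun cd d => d.foldl (pvStepCd L) cd) cd) k).isSome = true := by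
  induction M generalizing cd with
  | nil => exact h
  | cons d rest ih => exact ih _ (pvFoldl_mono L d cd k h)

theorem pvHit (L : List (List (String × Int))) (d : List (String × Int))
    (p : String × Int) (hP : pvPAll L p.1 p.2 = true) :
    ∀ cd, p ∈ d → (pvLookup (d.foldl (pvStepCd L) cd) p.1).isSome = true := by
  induction d with
  | nil => intro cd hp; cases hp
  | cons q rest ih =>
      intro cd hp
      rcases List.mem_cons.mp hp with hq | hq
      · subst hq
        rw [List.foldl_cons]
        refine pvFoldl_mono L rest _ p.1 ?_
        unfold pvStepCd
        by_cases hsome : (pvLookup cd p.1).isSome = true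
        · rw [if_pos hsome]; exact hsome
        · have hnone : pvLookup cd p.1 = none := by
            cases hlk : pvLookup cd p.1 with
            | none => rfl
            | some w => rw [hlk] at hsome; simp at hsome
          rw [if_neg hsome, if_pos hP, pvInsert_of_none cd p.1 p.2 hnone, pvLookup_append, hnone]
          simp [pvLookup]
      · exact ih _ hq

-- membership in the final common dict ⟷ commonness, for pairs of the input
theorem pvC_iff (L : List (List (String × Int))) (hL : Pre_dict_intersection L)
    (d : List (String × Int)) (hd : d ∈ L) (p : String × Int) (hp : p ∈ d) :
    (pvLookup (pvC L) p.1).isSome = pvPAll L p.1 p.2 := by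
  by_cases hP : pvPAll L p.1 p.2 = true
  · rw [hP]
    rcases List.append_of_mem hd with ⟨s, t, rfl⟩
    unfold pvC
    rw [List.foldl_append, List.foldl_cons]
    exact pvFoldl2_mono _ t _ p.1 (pvHit _ d p hP _ hp)
  · rw [Bool.eq_false_iff.mpr hP]
    cases hlk : pvLookup (pvC L) p.1 with
    | none => rfl
    | some w =>
        exfalso
        have hmem := pvMem_of_lookup _ _ _ hlk
        have hinv := pvInv_foldl2 L L [] (fun q hq => absurd hq (List.not_mem_nil))
        have hPw : pvPAll L p.1 w = true := hinv (p.1, w) hmem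
        have hlkd : pvLookup d p.1 = some p.2 := pvLookup_eq_some_of_mem d p (hL d hd) hp
        have : pvLookup d p.1 = some w := by
          unfold pvPAll at hPw
          rw [List.all_eq_true] at hPw
          simpa using hPw d hd
        rw [hlkd] at this
        injection this with hw
        rw [← hw] at hPw
        exact hP hPw

-- A's inner flag loop, as a step function on (common_dict, nd)
theorem pvAInner_eq (L : List (List (String × Int)))
    (st : List (String × Int) × List (String × Int)) (kv : String × Int) :
    pvAInner L st kv =
      (if (pvLookup st.1 kv.1).isSome then st
       else if !(pvPAll L kv.1 kv.2) then (st.1, pvInsert st.2 kv.1 kv.2)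
       else (pvInsert st.1 kv.1 kv.2, st.2)) := by
  unfold pvAInner
  rw [pvFlag_eq L kv.1 kv.2 true, Bool.true_and]

-- A's inner loop, characterised
theorem pvA_inner (L : List (List (String × Int)))
    (d cd nd : List (String × Int))
    (hdsub : ∀ p ∈ d, ∃ D ∈ L, pvLookup D p.1 = some p.2)
    (hkeys : (d.map Prod.fst).Nodup)
    (hnd : ∀ p ∈ d, pvLookup nd p.1 = none)
    (hinv : pvInv L cd) :
    d.foldl (pvAInner L) (cd, nd) =
      (d.foldl (pvStepCd L) cd, nd ++ d.filter (fun kv => !(pvPAll L kv.1 kv.2))) := by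
  induction d generalizing cd nd with
  | nil => simp
  | cons p rest ih =>
      simp only [List.map_cons, List.nodup_cons] at hkeys
      have hdsub' : ∀ q ∈ rest, ∃ D ∈ L, pvLookup D q.1 = some q.2 :=
        fun q hq => hdsub q (List.mem_cons_of_mem _ hq)
      simp only [List.foldl_cons, pvAInner_eq, List.filter_cons]
      by_cases hsome : (pvLookup cd p.1).isSome = true
      · -- key already in common_dict: A skips it, and it must be common
        have hP : pvPAll L p.1 p.2 = true := by
          rcases Option.isSome_iff_exists.mp hsome with ⟨w, hw⟩
          have hPw : pvPAll L p.1 w = true := hinv (p.1, w) (pvMem_of_lookup _ _ _ hw)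
          rcases hdsub p (List.mem_cons_self ..) with ⟨D, hD, hDlk⟩
          have : pvLookup D p.1 = some w := by
            unfold pvPAll at hPw
            rw [List.all_eq_true] at hPw
            simpa using hPw D hD
          rw [hDlk] at this
          injection this with hw2
          rw [← hw2] at hPw
          exact hPw
        rw [if_pos hsome]
        unfold pvStepCd
        rw [if_pos hsome, hP]
        simp only [Bool.not_true, Bool.false_eq_true, if_false]
        exact ih cd nd hdsub' hkeys.2 (fun q hq => hnd q (List.mem_cons_of_mem _ hq)) hinv
      · rw [if_neg hsome]
        have hcdnone : pvLookup cd p.1 = none := by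
          cases hlk : pvLookup cd p.1 with
          | none => rfl
          | some w => rw [hlk] at hsome; simp at hsome
        by_cases hP : pvPAll L p.1 p.2 = true
        · -- common: goes to common_dict
          rw [hP]
          simp only [Bool.not_true, Bool.false_eq_true, if_false]
          have hstep : pvStepCd L cd p = pvInsert cd p.1 p.2 := by
            unfold pvStepCd
            rw [if_neg (by simp [hsome]), if_pos hP]
          rw [← hstep]
          exact ih _ nd hdsub' hkeys.2 (fun q hq => hnd q (List.mem_cons_of_mem _ hq))
            (pvInv_step L cd p hinv)
        · -- not common: goes to nd
          rw [Bool.eq_false_iff.mpr hP]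
          simp only [Bool.not_false, if_true]
          have hndnone : pvLookup nd p.1 = none := hnd p (List.mem_cons_self ..)
          have hins : pvInsert nd p.1 p.2 = nd ++ [p] := by
            rw [pvInsert_of_none nd p.1 p.2 hndnone]
          have hstep : pvStepCd L cd p = cd := by
            unfold pvStepCd
            rw [if_neg (by simp [hsome]), Bool.eq_false_iff.mpr hP]
            simp
          have hnd' : ∀ q ∈ rest, pvLookup (nd ++ [p]) q.1 = none := by
            intro q hq
            rw [pvLookup_append, hnd q (List.mem_cons_of_mem _ hq)]
            have hne : p.1 ≠ q.1 := by
              intro he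
              exact hkeys.1 (he ▸ List.mem_map.mpr ⟨q, hq, rfl⟩)
            simp [pvLookup, hne]
          rw [hins, ih cd (nd ++ [p]) hdsub' hkeys.2 hnd' hinv, hstep,
            List.append_assoc]
          rfl

theorem pvA_outer (L : List (List (String × Int))) (hL : Pre_dict_intersection L)
    (M : List (List (String × Int))) :
    (∀ d ∈ M, d ∈ L) → ∀ cd pds, pvInv L cd →
    M.foldl (pvAOuter L) (cd, pds) =
      (M.foldl (fun cd d => d.foldl (pvStepCd L) cd) cd,
       pds ++ M.map (fun d => d.filter (fun kv => !(pvPAll L kv.1 kv.2)))) := by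
  induction M with
  | nil => intro _ cd pds _; simp
  | cons d rest ih =>
      intro hM cd pds hinv
      have hdL : d ∈ L := hM d (List.mem_cons_self ..)
      have hdsub : ∀ p ∈ d, ∃ D ∈ L, pvLookup D p.1 = some p.2 :=
        fun p hp => ⟨d, hdL, pvLookup_eq_some_of_mem d p (hL d hdL) hp⟩
      have hhead : pvAOuter L (cd, pds) d =
          (d.foldl (pvStepCd L) cd, pds ++ [d.filter (fun kv => !(pvPAll L kv.1 kv.2))]) := by
        unfold pvAOuter
        rw [pvA_inner L d cd [] hdsub (hL d hdL) (fun p _ => rfl) hinv]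
        simp
      rw [List.foldl_cons, hhead, List.map_cons,
        ih (fun e he => hM e (List.mem_cons_of_mem _ he)) _ _ (pvInv_foldl L d cd hinv)]
      simp

theorem pvA_eq (L : List (List (String × Int))) (hL : Pre_dict_intersection L) :
    dict_intersection L =
      (pvC L, L.map (fun d => d.filter (fun kv => !(pvPAll L kv.1 kv.2)))) := by
  unfold dict_intersection
  rw [pvA_outer L hL L (fun _ h => h) [] [] (fun q hq => absurd hq (List.not_mem_nil))]
  rfl

theorem pvB_common_eq (L : List (List (String × Int))) (hL : Pre_dict_intersection L) :
    pvBCommon L = pvC L := by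
  have hstep : ∀ (cd : List (String × Int)) (kv : String × Int),
      (if (pvLookup cd kv.1).isNone && ((pvBCount L).getD kv 0 == (L.length : Int))
       then cd ++ [kv] else cd) = pvStepCd L cd kv := by
    intro cd kv
    rw [pvCond_iff L hL kv]
    unfold pvStepCd
    by_cases hsome : (pvLookup cd kv.1).isSome = true
    · have : (pvLookup cd kv.1).isNone = false := by
        cases h : pvLookup cd kv.1 with
        | none => rw [h] at hsome; simp at hsome
        | some w => rfl
      rw [this, if_pos hsome]
      simp
    · have hnone : pvLookup cd kv.1 = none := by
        cases h : pvLookup cd kv.1 with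
        | none => rfl
        | some w => rw [h] at hsome; simp at hsome
      rw [if_neg hsome]
      rw [hnone]
      simp only [Option.isNone_none, Bool.true_and]
      by_cases hP : pvPAll L kv.1 kv.2 = true
      · rw [hP]
        simp [pvInsert_of_none cd kv.1 kv.2 hnone]
      · rw [Bool.eq_false_iff.mpr hP]
        simp
  unfold pvBCommon pvC
  simp only [hstep]

theorem pvB_eq (L : List (List (String × Int))) (hL : Pre_dict_intersection L) :
    dict_intersection_alt L =
      (pvC L, L.map (fun d => d.filter (fun kv => !(pvPAll L kv.1 kv.2)))) := by
  show (pvBCommon L,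
      L.map (fun d => d.filter (fun kv => (pvLookup (pvBCommon L) kv.1).isNone))) = _
  rw [pvB_common_eq L hL]
  congr 1
  apply List.map_congr_left
  intro d hd
  apply List.filter_congr
  intro kv hkv
  rw [show (pvLookup (pvC L) kv.1).isNone = !(pvLookup (pvC L) kv.1).isSome by
    cases pvLookup (pvC L) kv.1 <;> rfl]
  rw [pvC_iff L hL d hd kv hkv]

-- ===== VERDICT (by name: the statement is the Claim_ definition above) =====
theorem dict_intersection_spec : Claim_equal_dict_intersection := by
  intro L _ hL
  unfold Spec_dict_intersection
  rw [pvA_eq L hL, pvB_eq L hL]
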